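-- pv_equiv track=rewrite | github.com/Leapense/problems | 31663번： Mean Words/Mean Words.py | calculate_mean_word
-- ===== SOURCE A (Python) =====
-- def calculate_mean_word(words):
--     max_length = max(len(word) for word in words)
--     sum_ascii = [0] * max_length
--     count_ascii = [0] * max_length
--
--     for word in words:
--         for i, char in enumerate(word):
--             sum_ascii[i] += ord(char)
--             count_ascii[i] += 1
--
--     mean_word = []
--
--     for i in range(max_length):
--         if count_ascii[i] > 0:
--             average_ascii = sum_ascii[i] // count_ascii[i]
--             mean_word.append(chr(average_ascii))
--
--     return ''.join(mean_word)
-- ===== SOURCE B (Python) =====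
-- def calculate_mean_word(words):
--     max_length = max(len(word) for word in words)
--     mean_word = []
--     for i in range(max_length):
--         col = [word[i] for word in words if len(word) > i]
--         if col:
--             mean_word.append(chr(sum(ord(c) for c in col) // len(col)))
--     return ''.join(mean_word)
-- ===== Notes on version B (the rewrite author's own statement) =====
-- stated objective: idiomatic
-- what changed: B traverses column-major: for each position it gathers the column of characters present and averages it directly, instead of A's row-major accumulation into parallel sum/count arrays.
import Mathlib
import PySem

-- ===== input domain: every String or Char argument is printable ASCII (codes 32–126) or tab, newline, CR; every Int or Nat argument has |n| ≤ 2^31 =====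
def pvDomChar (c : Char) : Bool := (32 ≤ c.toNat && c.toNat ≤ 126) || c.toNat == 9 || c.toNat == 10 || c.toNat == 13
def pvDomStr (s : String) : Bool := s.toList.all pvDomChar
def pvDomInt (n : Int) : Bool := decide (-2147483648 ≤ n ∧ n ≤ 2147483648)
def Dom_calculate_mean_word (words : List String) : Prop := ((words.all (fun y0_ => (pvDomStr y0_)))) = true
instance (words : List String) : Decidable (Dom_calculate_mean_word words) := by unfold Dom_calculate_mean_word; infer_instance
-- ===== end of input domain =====

-- B replaces A's row-major accumulation into parallel sum/count arrays by a column-major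
-- (transpose-style) pass: per position it gathers the column of characters and averages it (objective: idiomatic).

-- ===== PORT A =====
-- one step of A's inner loop body: sum_ascii[i] += ord(char); count_ascii[i] += 1
def pvStep (q : List Int × List Int) (ic : Int × Char) : List Int × List Int :=
  (q.1.set ic.1.toNat (q.1.getD ic.1.toNat 0 + (ic.2.toNat : Int)),
   q.2.set ic.1.toNat (q.2.getD ic.1.toNat 0 + 1))

-- one step of A's outer loop: for i, char in enumerate(word): …
def pvAInner (p : List Int × List Int) (w : String) : List Int × List Int :=
  (PySem.List.enumerate w.toList 0).foldl pvStep p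

def calculate_mean_word (words : List String) : String :=
  -- max(len(word) for word in words); fold with base 0 equals Python's max on the nonempty list (Pre_)
  let maxLen : Nat := (words.map (fun w => w.toList.length)).foldl max 0
  let sc := words.foldl pvAInner (List.replicate maxLen (0 : Int), List.replicate maxLen (0 : Int))
  let mean := (List.range maxLen).foldl (fun (acc : List Char) i =>
    if sc.2.getD i 0 > 0 then
      acc ++ [Char.ofNat (PySem.Int.floordiv (sc.1.getD i 0) (sc.2.getD i 0)).toNat]
    else acc) []
  String.ofList mean

-- ===== PORT B =====
def calculate_mean_word_alt (words : List String) : String :=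
  let maxLen : Nat := (words.map (fun w => w.toList.length)).foldl max 0
  let mean := (List.range maxLen).foldl (fun (acc : List Char) i =>
    let col := (words.filter (fun w => decide (i < w.toList.length))).map (fun w => w.toList.getD i ' ')
    if col ≠ [] then
      acc ++ [Char.ofNat (PySem.Int.floordiv
        (col.foldl (fun s c => s + (c.toNat : Int)) 0) (col.length : Int)).toNat]
    else acc) []
  String.ofList mean

-- ===== PRECONDITION & SPEC =====
-- Python's max() raises ValueError on an empty sequence, so A (and B) raise on words = []
def Pre_calculate_mean_word (words : List String) : Prop := words ≠ []
instance (words : List String) : Decidable (Pre_calculate_mean_word words) := by unfold Pre_calculate_mean_word; infer_instance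
def pvWitness_calculate_mean_word : List String := (["ab", "c"])

def Spec_calculate_mean_word (words : List String) (out : String) : Prop := out = calculate_mean_word_alt words
instance (words : List String) (out : String) : Decidable (Spec_calculate_mean_word words out) := by unfold Spec_calculate_mean_word; infer_instance

-- ===== CLAIM (what is proved, stated in full; the proofs are below) =====
def Claim_equal_calculate_mean_word : Prop := ∀ (words : List String), Dom_calculate_mean_word words → Pre_calculate_mean_word words → Spec_calculate_mean_word words (calculate_mean_word words)

-- ===== LEMMAS AND PROOFS =====

-- column of characters at position i, as B builds it
def pvCol (words : List String) (i : Nat) : List Char :=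
  (words.filter (fun w => decide (i < w.toList.length))).map (fun w => w.toList.getD i ' ')

theorem foldl_max_le_init (l : List Nat) (init : Nat) : init ≤ l.foldl max init := by
  induction l generalizing init with
  | nil => simp
  | cons b l ih => exact le_trans (le_max_left _ _) (ih _)

theorem mem_le_foldl_max (l : List Nat) (a : Nat) (h : a ∈ l) (init : Nat) : a ≤ l.foldl max init := by
  induction l generalizing init with
  | nil => cases h
  | cons b l ih =>
    cases h with
    | head => exact le_trans (le_max_right _ _) (foldl_max_le_init _ _)
    | tail _ h => exact ih h _

-- effect of A's inner loop on one word, pointwise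
theorem pvAInner_word (cs : List Char) (n : Nat) (s c : List Int)
    (hs : n + cs.length ≤ s.length) (hc : n + cs.length ≤ c.length) :
    ((PySem.List.enumerate cs (n : Int)).foldl pvStep (s, c)).1.length = s.length ∧
    ((PySem.List.enumerate cs (n : Int)).foldl pvStep (s, c)).2.length = c.length ∧
    ∀ i : Nat,
      ((PySem.List.enumerate cs (n : Int)).foldl pvStep (s, c)).1.getD i 0
        = s.getD i 0 + (if n ≤ i ∧ i < n + cs.length then ((cs.getD (i - n) ' ').toNat : Int) else 0) ∧
      ((PySem.List.enumerate cs (n : Int)).foldl pvStep (s, c)).2.getD i 0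
        = c.getD i 0 + (if n ≤ i ∧ i < n + cs.length then 1 else 0) := by
  induction cs generalizing n s c with
  | nil =>
    refine ⟨rfl, rfl, fun i => ?_⟩
    rw [if_neg (by simp only [List.length_nil]; omega)]
    simp [PySem.List.enumerate]
  | cons x xs ih =>
    simp only [List.length_cons] at hs hc ⊢
    have hn : n < s.length := by omega
    have hn' : n < c.length := by omega
    have hcast : ((n : Int)).toNat = n := Int.toNat_natCast n
    have hstep : PySem.List.enumerate (x :: xs) (n : Int) = ((n : Int), x) :: PySem.List.enumerate xs ((n : Int) + 1) := by
      simp [PySem.List.enumerate_cons]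
    have hone : ((n : Int) + 1) = ((n + 1 : Nat) : Int) := by push_cast; ring
    set s' := s.set n (s.getD n 0 + (x.toNat : Int)) with hs'
    set c' := c.set n (c.getD n 0 + 1) with hc'
    have hstep2 : pvStep (s, c) ((n : Int), x) = (s', c') := by
      simp [pvStep, hcast, hs', hc']
    have ihr := ih (n + 1) s' c'
      (by rw [hs', List.length_set]; omega)
      (by rw [hc', List.length_set]; omega)
    rw [hstep]
    simp only [List.foldl_cons, hstep2, hone]
    refine ⟨by rw [ihr.1]; simp [hs', List.length_set],
            by rw [ihr.2.1]; simp [hc', List.length_set], fun i => ?_⟩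
    obtain ⟨e1, e2⟩ := ihr.2.2 i
    have hgds : s'.getD i 0 = if i = n then s.getD n 0 + (x.toNat : Int) else s.getD i 0 := by
      simp only [hs', List.getD_eq_getElem?_getD, List.getElem?_set]
      by_cases hin : i = n
      · subst hin; rw [if_pos rfl, if_pos hn]; simp
      · rw [if_neg (fun hh => hin hh.symm), if_neg hin]
    have hgdc : c'.getD i 0 = if i = n then c.getD n 0 + 1 else c.getD i 0 := by
      simp only [hc', List.getD_eq_getElem?_getD, List.getElem?_set]
      by_cases hin : i = n
      · subst hin; rw [if_pos rfl, if_pos hn']; simp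
      · rw [if_neg (fun hh => hin hh.symm), if_neg hin]
    rw [e1, e2, hgds, hgdc]
    constructor
    · by_cases h : i = n
      · subst h
        rw [if_pos rfl, if_neg (by omega), if_pos (by omega : i ≤ i ∧ i < i + (xs.length + 1))]
        rw [Nat.sub_self, List.getD_cons_zero]
        ring
      · rw [if_neg h]
        by_cases h2 : n + 1 ≤ i ∧ i < n + 1 + xs.length
        · rw [if_pos h2, if_pos (by omega : n ≤ i ∧ i < n + (xs.length + 1))]
          have hix : i - n = (i - (n + 1)) + 1 := by omega
          rw [hix, List.getD_cons_succ]
        · rw [if_neg h2, if_neg (by omega : ¬(n ≤ i ∧ i < n + (xs.length + 1)))]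
    · by_cases h : i = n
      · subst h
        rw [if_pos rfl, if_neg (by omega), if_pos (by omega : i ≤ i ∧ i < i + (xs.length + 1))]
        ring
      · rw [if_neg h]
        by_cases h2 : n + 1 ≤ i ∧ i < n + 1 + xs.length
        · rw [if_pos h2, if_pos (by omega : n ≤ i ∧ i < n + (xs.length + 1))]
        · rw [if_neg h2, if_neg (by omega : ¬(n ≤ i ∧ i < n + (xs.length + 1)))]

-- pvCol on a cons
theorem pvCol_cons (w : String) (ws : List String) (i : Nat) :
    pvCol (w :: ws) i = (if i < w.toList.length then [w.toList.getD i ' '] else []) ++ pvCol ws i := by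
  have hlen : w.toList.length = w.length := by simp
  simp only [pvCol, List.filter_cons, hlen]
  by_cases h : i < w.length <;> simp [h]

-- effect of A's whole accumulation, pointwise: column sum and column count
theorem pvA_fold (words : List String) (s c : List Int)
    (hs : ∀ w ∈ words, w.toList.length ≤ s.length)
    (hc : ∀ w ∈ words, w.toList.length ≤ c.length) :
    (words.foldl pvAInner (s, c)).1.length = s.length ∧
    (words.foldl pvAInner (s, c)).2.length = c.length ∧
    ∀ i : Nat,
      (words.foldl pvAInner (s, c)).1.getD i 0
        = s.getD i 0 + ((pvCol words i).map (fun ch => (ch.toNat : Int))).sum ∧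
      (words.foldl pvAInner (s, c)).2.getD i 0
        = c.getD i 0 + ((pvCol words i).length : Int) := by
  induction words generalizing s c with
  | nil => exact ⟨rfl, rfl, fun i => by simp [pvCol]⟩
  | cons w ws ih =>
    have hw := pvAInner_word w.toList 0 s c (by simpa using hs w (by simp)) (by simpa using hc w (by simp))
    simp only [Nat.cast_zero, Nat.zero_add, Nat.zero_le, true_and, Nat.sub_zero] at hw
    have hdef : pvAInner (s, c) w = (PySem.List.enumerate w.toList 0).foldl pvStep (s, c) := rfl
    rw [← hdef] at hw
    have ihr := ih (pvAInner (s, c) w).1 (pvAInner (s, c) w).2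
      (fun u hu => by rw [hw.1]; exact hs u (by simp [hu]))
      (fun u hu => by rw [hw.2.1]; exact hc u (by simp [hu]))
    simp only [List.foldl_cons]
    refine ⟨ihr.1.trans hw.1, ihr.2.1.trans hw.2.1, fun i => ?_⟩
    obtain ⟨e1, e2⟩ := ihr.2.2 i
    obtain ⟨f1, f2⟩ := hw.2.2 i
    have e1' : (List.foldl pvAInner (pvAInner (s, c) w) ws).1.getD i 0
        = (pvAInner (s, c) w).1.getD i 0 + ((pvCol ws i).map (fun ch => (ch.toNat : Int))).sum := e1
    have e2' : (List.foldl pvAInner (pvAInner (s, c) w) ws).2.getD i 0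
        = (pvAInner (s, c) w).2.getD i 0 + ((pvCol ws i).length : Int) := e2
    rw [e1', e2', f1, f2, pvCol_cons]
    by_cases h : i < w.toList.length
    · simp only [if_pos h, List.map_append, List.sum_append, List.length_append, List.map_cons,
        List.map_nil, List.sum_cons, List.sum_nil, List.length_cons, List.length_nil]
      constructor
      · ring
      · push_cast; ring
    · simp only [if_neg h, List.nil_append]
      constructor
      · ring
      · ring

-- ===== VERDICT (by name: the statement is the Claim_ definition above) =====
theorem calculate_mean_word_spec : Claim_equal_calculate_mean_word := by
  intro words _ _
  unfold Spec_calculate_mean_word calculate_mean_word calculate_mean_word_alt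
  dsimp only
  set maxLen := (words.map (fun w => w.toList.length)).foldl max 0 with hml
  have hlen : ∀ w ∈ words, w.toList.length ≤ maxLen := fun w hw =>
    mem_le_foldl_max (words.map (fun w => w.toList.length)) w.toList.length
      (List.mem_map.mpr ⟨w, hw, rfl⟩) 0
  have hrep : (List.replicate maxLen (0 : Int)).length = maxLen := by simp
  have hA := pvA_fold words (List.replicate maxLen 0) (List.replicate maxLen 0)
    (fun w hw => by rw [hrep]; exact hlen w hw) (fun w hw => by rw [hrep]; exact hlen w hw)
  set sc := words.foldl pvAInner (List.replicate maxLen (0 : Int), List.replicate maxLen (0 : Int)) with hsc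
  congr 1
  apply PySem.List.foldl_congr_mem
  intro acc i hi
  obtain ⟨e1, e2⟩ := hA.2.2 i
  have hrep0 : (List.replicate maxLen (0 : Int)).getD i 0 = 0 := by
    by_cases h : i < maxLen <;> simp [List.getD_eq_getElem?_getD, h]
  rw [hrep0] at e1 e2
  simp only [Int.zero_add] at e1 e2
  have hcol : (words.filter (fun w => decide (i < w.toList.length))).map (fun w => w.toList.getD i ' ') = pvCol words i := rfl
  rw [hcol, e1, e2]
  have hsum : (pvCol words i).foldl (fun s c => s + (c.toNat : Int)) 0
      = ((pvCol words i).map (fun ch => (ch.toNat : Int))).sum := by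
    rw [PySem.List.foldl_add]; ring
  by_cases h : pvCol words i = []
  · simp [h]
  · have hpos : (0 : Int) < ((pvCol words i).length : Int) := by
      have := List.length_pos_iff.mpr h; exact_mod_cast this
    simp only [ne_eq, h, not_false_eq_true, if_true, if_pos hpos, hsum]
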